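-- pv_equiv track=rewrite | github.com/miztachristian/lottery-prediction-system | wheel_system.py | verify_guarantee
-- ===== SOURCE A (Python) =====
-- from itertools import combinations
-- from typing import List, Set, Tuple, Dict
--
-- def verify_guarantee(tickets: List[List[int]], numbers: List[int],
--                     winning_count: int, guarantee: int):
--     """
--     Verify that the wheel provides the stated guarantee.
--
--     Tests ALL possible combinations of 'winning_count' numbers from the pool
--     and ensures at least one ticket has 'guarantee' matches.
--
--     Returns:
--         (all_verified, failed_cases, total_combos, covered_combos)
--     """
--     nums = sorted(numbers)
--     all_verified = True
--     failed_cases = []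
--     total_combos = 0
--     covered_combos = 0
--
--     # Test every possible "winning" combination of winning_count numbers
--     for winning in combinations(nums, winning_count):
--         winning_set = set(winning)
--         max_hits = 0
--         total_combos += 1
--
--         for ticket in tickets:
--             hits = len(set(ticket).intersection(winning_set))
--             max_hits = max(max_hits, hits)
--
--         if max_hits >= guarantee:
--             covered_combos += 1
--         else:
--             all_verified = False
--             failed_cases.append(winning)
--
--     return all_verified, failed_cases, total_combos, covered_combos
-- ===== SOURCE B (Python) =====
-- from itertools import combinations
--
-- def verify_guarantee(tickets, numbers, winning_count, guarantee):
--     combos = list(combinations(sorted(numbers), winning_count))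
--     total = len(combos)
--     if guarantee <= 0 or not combos:
--         # a guarantee of zero (or fewer) matches is met vacuously,
--         # and with no winning combinations there is nothing to verify
--         return True, [], total, total
--     if guarantee > winning_count:
--         # no ticket can match more numbers than a winning draw contains
--         return False, combos, total, 0
--     # index every guarantee-sized subset held by some ticket (numbers outside
--     # the pool can never be hit, so tickets are pruned to the pool first),
--     # then test each winning combo by looking up its own guarantee-sized subsets
--     pool = set(numbers)
--     key_subsets = set()
--     for t in tickets:
--         key_subsets.update(combinations(sorted(set(t) & pool), guarantee))
--     failed = [w for w in combos
--               if not any(s in key_subsets for s in combinations(w, guarantee))]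
--     return not failed, failed, total, total - len(failed)
-- ===== Notes on version B (the rewrite author's own statement) =====
-- stated objective: alternative
-- what changed: Instead of scanning every ticket per winning combination, B builds one hash set of all guarantee-sized subsets occurring in any pool-pruned ticket and tests each combination by membership of its own guarantee-sized subsets, deriving the flag and counters from the failed list.
import Mathlib
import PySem

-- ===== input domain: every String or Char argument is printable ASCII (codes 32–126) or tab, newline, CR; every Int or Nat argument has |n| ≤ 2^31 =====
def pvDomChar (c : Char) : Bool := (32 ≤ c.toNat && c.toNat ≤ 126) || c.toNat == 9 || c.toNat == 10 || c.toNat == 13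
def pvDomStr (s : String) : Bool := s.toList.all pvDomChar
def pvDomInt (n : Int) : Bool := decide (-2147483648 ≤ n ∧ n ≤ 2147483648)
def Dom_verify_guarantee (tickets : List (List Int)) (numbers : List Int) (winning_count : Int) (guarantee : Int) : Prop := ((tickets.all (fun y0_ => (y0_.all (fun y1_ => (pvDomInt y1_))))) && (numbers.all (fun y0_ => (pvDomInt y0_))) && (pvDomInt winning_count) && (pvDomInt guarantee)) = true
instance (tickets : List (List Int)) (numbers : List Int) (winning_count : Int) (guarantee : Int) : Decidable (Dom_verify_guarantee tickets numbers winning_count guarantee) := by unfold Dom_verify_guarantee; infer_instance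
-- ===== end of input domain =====

-- B replaces A's per-combination scan over all tickets by a precomputed hash set of all
-- guarantee-sized subsets of the pool-pruned tickets, testing each winning combination by
-- membership of its own guarantee-sized subsets (objective: alternative algorithm).

-- shared helper: port of itertools.combinations(xs, r) (lexicographic by position)
def pyCombinations : List Int → Nat → List (List Int)
  | _, 0 => [[]]
  | [], _ + 1 => []
  | x :: xs, r + 1 =>
      (pyCombinations xs r).map (fun c => x :: c) ++ pyCombinations xs (r + 1)

-- ===== PORT A =====
def verify_guarantee (tickets : List (List Int)) (numbers : List Int) (winning_count : Int) (guarantee : Int) : Bool × List (List Int) × Int × Int :=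
  let nums := PySem.List.sorted numbers (fun x => x)
  (pyCombinations nums winning_count.toNat).foldl
    (fun (st : Bool × List (List Int) × Int × Int) winning =>
      let winning_set := PySem.Set.ofList winning
      let max_hits : Int := tickets.foldl
        (fun m ticket =>
          max m ((PySem.Set.len (PySem.Set.inter (PySem.Set.ofList ticket) winning_set) : Int)))
        0
      let st' := (st.1, st.2.1, st.2.2.1 + 1, st.2.2.2)
      if max_hits ≥ guarantee then
        (st'.1, st'.2.1, st'.2.2.1, st'.2.2.2 + 1)
      else
        (false, st'.2.1 ++ [winning], st'.2.2.1, st'.2.2.2))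
    (true, [], 0, 0)

-- ===== PORT B =====
def verify_guarantee_alt (tickets : List (List Int)) (numbers : List Int) (winning_count : Int) (guarantee : Int) : Bool × List (List Int) × Int × Int :=
  let combos := pyCombinations (PySem.List.sorted numbers (fun x => x)) winning_count.toNat
  let total : Int := combos.length
  if guarantee ≤ 0 ∨ combos.isEmpty then (true, [], total, total)
  else if winning_count < guarantee then (false, combos, total, 0)
  else
    let pool := PySem.Set.ofList numbers
    let key_subsets : PySem.Set (List Int) := tickets.foldl
      (fun s t => PySem.Set.update s
        (pyCombinations (PySem.List.sorted (PySem.Set.inter (PySem.Set.ofList t) pool) (fun x => x)) guarantee.toNat))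
      PySem.Set.empty
    let failed := combos.filter (fun w =>
      !((pyCombinations w guarantee.toNat).any (fun s => PySem.Set.contains key_subsets s)))
    (failed.isEmpty, failed, total, total - failed.length)

-- ===== PRECONDITION & SPEC =====
-- Pre_ excludes winning_count < 0, where Python's combinations raises ValueError (in both A and B).
def Pre_verify_guarantee (tickets : List (List Int)) (numbers : List Int) (winning_count : Int) (guarantee : Int) : Prop := 0 ≤ winning_count
instance (tickets : List (List Int)) (numbers : List Int) (winning_count : Int) (guarantee : Int) : Decidable (Pre_verify_guarantee tickets numbers winning_count guarantee) := by unfold Pre_verify_guarantee; infer_instance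

def pvWitness_verify_guarantee : List (List Int) × List Int × Int × Int := ([[1, 2], [3, 4]], [1, 2, 3, 4], 2, 1)

def Spec_verify_guarantee (tickets : List (List Int)) (numbers : List Int) (winning_count : Int) (guarantee : Int) (out : Bool × List (List Int) × Int × Int) : Prop := out = verify_guarantee_alt tickets numbers winning_count guarantee
instance (tickets : List (List Int)) (numbers : List Int) (winning_count : Int) (guarantee : Int) (out : Bool × List (List Int) × Int × Int) : Decidable (Spec_verify_guarantee tickets numbers winning_count guarantee out) := by unfold Spec_verify_guarantee; infer_instance

-- ===== CLAIM (what is proved, stated in full; the proofs are below) =====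
def Claim_equal_verify_guarantee : Prop := ∀ (tickets : List (List Int)) (numbers : List Int) (winning_count : Int) (guarantee : Int), Dom_verify_guarantee tickets numbers winning_count guarantee → Pre_verify_guarantee tickets numbers winning_count guarantee → Spec_verify_guarantee tickets numbers winning_count guarantee (verify_guarantee tickets numbers winning_count guarantee)

-- ===== LEMMAS AND PROOFS =====

-- membership in pyCombinations xs r = sublists of xs of length r
theorem mem_pyCombinations (s xs : List Int) (r : Nat) :
    s ∈ pyCombinations xs r ↔ s.Sublist xs ∧ s.length = r := by
  induction xs generalizing s r with
  | nil =>
      cases r with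
      | zero => simp [pyCombinations, List.sublist_nil, List.length_eq_zero_iff]
      | succ r =>
          simp only [pyCombinations, List.not_mem_nil, false_iff, not_and]
          intro hsub
          rw [List.sublist_nil.mp hsub]
          simp
  | cons x xs ih =>
      cases r with
      | zero =>
          constructor
          · intro hs
            have hnil : s = [] := by simpa [pyCombinations] using hs
            subst hnil; exact ⟨List.nil_sublist _, rfl⟩
          · rintro ⟨-, hlen⟩
            have hnil : s = [] := List.length_eq_zero_iff.mp hlen
            subst hnil; simp [pyCombinations]
      | succ r =>
          simp only [pyCombinations, List.mem_append, List.mem_map, ih]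
          constructor
          · rintro (⟨c, ⟨hsub, hlen⟩, rfl⟩ | ⟨hsub, hlen⟩)
            · exact ⟨hsub.cons₂ x, by simp [hlen]⟩
            · exact ⟨hsub.cons x, hlen⟩
          · rintro ⟨hsub, hlen⟩
            rcases List.sublist_cons_iff.mp hsub with h | ⟨c, rfl, hc⟩
            · exact Or.inr ⟨h, hlen⟩
            · exact Or.inl ⟨c, ⟨hc, by simpa using hlen⟩, rfl⟩

-- a strictly increasing list whose elements occur in a sorted list is a sublist of it
theorem sublist_of_pairwise_lt_subset (s xs : List Int)
    (hs : s.Pairwise (· < ·)) (hxs : xs.Pairwise (· ≤ ·))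
    (hsub : ∀ a ∈ s, a ∈ xs) : s.Sublist xs := by
  induction xs generalizing s with
  | nil =>
      cases s with
      | nil => exact List.Sublist.refl _
      | cons a s => exact absurd (hsub a (by simp)) (by simp)
  | cons x xs ih =>
      cases s with
      | nil => exact List.nil_sublist _
      | cons a s =>
          rcases List.pairwise_cons.mp hs with ⟨ha, hs'⟩
          rcases List.pairwise_cons.mp hxs with ⟨hx, hxs'⟩
          by_cases hax : a = x
          · subst hax
            refine List.Sublist.cons₂ a (ih s hs' hxs' ?_)
            intro b hb
            have hba : a < b := ha b hb
            rcases List.mem_cons.mp (hsub b (by simp [hb])) with h | h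
            · omega
            · exact h
          · have hamem : a ∈ xs := by
              rcases List.mem_cons.mp (hsub a (by simp)) with h | h
              · exact absurd h hax
              · exact h
            refine List.Sublist.cons x (ih (a :: s) hs hxs' ?_)
            intro b hb
            rcases List.mem_cons.mp (hsub b (by simp [hb])) with h | h
            · exfalso
              have hxa : x ≤ a := hx a hamem
              rcases List.mem_cons.mp hb with rfl | hb'
              · exact hax (le_antisymm (by omega) hxa)
              · have : a < b := ha b hb'
                omega
            · exact h

-- membership in B's key_subsets fold
theorem mem_foldl_update {α : Type} [BEq α] [LawfulBEq α]
    (l : List (List Int)) (f : List Int → List α) (s0 : PySem.Set α) (y : α) :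
    y ∈ l.foldl (fun s t => PySem.Set.update s (f t)) s0 ↔ y ∈ s0 ∨ ∃ t ∈ l, y ∈ f t := by
  induction l generalizing s0 with
  | nil => simp
  | cons t l ih =>
      simp only [List.foldl_cons, ih, PySem.Set.mem_update, List.mem_cons]
      constructor
      · rintro ((h | h) | ⟨u, hu, hy⟩)
        · exact Or.inl h
        · exact Or.inr ⟨t, Or.inl rfl, h⟩
        · exact Or.inr ⟨u, Or.inr hu, hy⟩
      · rintro (h | ⟨u, (rfl | hu), hy⟩)
        · exact Or.inl (Or.inl h)
        · exact Or.inl (Or.inr hy)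
        · exact Or.inr ⟨u, hu, hy⟩

-- sorted of a duplicate-free list is strictly increasing
theorem sorted_nodup_pairwise_lt (I : List Int) (h : I.Nodup) :
    (PySem.List.sorted I (fun x => x)).Pairwise (· < ·) := by
  have hperm : (PySem.List.sorted I (fun x => x)).Perm I := PySem.List.sorted_perm I _ false
  have hnd : (PySem.List.sorted I (fun x => x)).Nodup := hperm.nodup_iff.mpr h
  have hle : (PySem.List.sorted I (fun x => x)).Pairwise (· ≤ ·) :=
    PySem.List.sorted_pairwise I (fun x => x)
  exact (hle.and (List.nodup_iff_pairwise_ne.mp hnd)).imp (fun h => lt_of_le_of_ne h.1 h.2)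

-- one ticket covers a sorted pool combination iff the intersection is big enough
theorem per_ticket_iff (t numbers w : List Int) (g : Nat) (hw : w.Pairwise (· ≤ ·))
    (hwn : ∀ a ∈ w, a ∈ numbers) :
    (∃ s ∈ pyCombinations w g,
        s ∈ pyCombinations (PySem.List.sorted
          (PySem.Set.inter (PySem.Set.ofList t) (PySem.Set.ofList numbers)) (fun x => x)) g) ↔
      g ≤ (PySem.Set.inter (PySem.Set.ofList t) (PySem.Set.ofList w)).length := by
  set TP := PySem.List.sorted
      (PySem.Set.inter (PySem.Set.ofList t) (PySem.Set.ofList numbers)) (fun x => x) with hTP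
  have hD : TP.Pairwise (· < ·) :=
    sorted_nodup_pairwise_lt _ (PySem.Set.nodup_inter _ _ (PySem.Set.nodup_ofList t))
  have hmemTP : ∀ a, a ∈ TP ↔ a ∈ t ∧ a ∈ numbers := by
    intro a
    rw [hTP, PySem.List.mem_sorted]
    simp [pysem]
  constructor
  · rintro ⟨s, hsw, hsD⟩
    rw [mem_pyCombinations] at hsw hsD
    obtain ⟨hsubw, hlen⟩ := hsw
    obtain ⟨hsubD, -⟩ := hsD
    have hspw : s.Pairwise (· < ·) := hD.sublist hsubD
    have hnd : s.Nodup := hspw.imp ne_of_lt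
    have hss : s ⊆ PySem.Set.inter (PySem.Set.ofList t) (PySem.Set.ofList w) := by
      intro a ha
      have h1 := (hmemTP a).mp (hsubD.subset ha)
      simp only [pysem]
      exact ⟨h1.1, hsubw.subset ha⟩
    calc g = s.length := hlen.symm
      _ ≤ _ := (hnd.subperm hss).length_le
  · intro hg
    set I := PySem.Set.inter (PySem.Set.ofList t) (PySem.Set.ofList w) with hI
    have hmemI : ∀ a, a ∈ I ↔ a ∈ t ∧ a ∈ w := by
      intro a; rw [hI]; simp [pysem]
    have hndI : I.Nodup := PySem.Set.nodup_inter _ _ (PySem.Set.nodup_ofList t)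
    set J := PySem.List.sorted I (fun x => x) with hJ
    have hpermJ : J.Perm I := PySem.List.sorted_perm I _ false
    have hJlt : J.Pairwise (· < ·) := sorted_nodup_pairwise_lt I hndI
    have hmemJ : ∀ a ∈ J.take g, a ∈ t ∧ a ∈ w := by
      intro a ha
      exact (hmemI a).mp (hpermJ.mem_iff.mp ((List.take_sublist _ _).subset ha))
    refine ⟨J.take g, ?_, ?_⟩
    · rw [mem_pyCombinations]
      refine ⟨sublist_of_pairwise_lt_subset _ _ (hJlt.sublist (List.take_sublist _ _)) hw
        (fun a ha => (hmemJ a ha).2), ?_⟩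
      rw [List.length_take, hpermJ.length_eq]; omega
    · rw [mem_pyCombinations]
      refine ⟨sublist_of_pairwise_lt_subset _ _ (hJlt.sublist (List.take_sublist _ _))
        (hD.imp le_of_lt) ?_, ?_⟩
      · intro a ha
        have := hmemJ a ha
        exact (hmemTP a).mpr ⟨this.1, hwn a this.2⟩
      · rw [List.length_take, hpermJ.length_eq]; omega

-- A's inner max-scan reaches the guarantee iff the start does or some ticket does.
theorem maxscan_ge_iff (tickets : List (List Int)) (g : Int) (f : List Int → Int) (a : Int) :
    (g ≤ tickets.foldl (fun m t => max m (f t)) a) ↔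
      (g ≤ a ∨ ∃ t ∈ tickets, g ≤ f t) := by
  induction tickets generalizing a with
  | nil => simp
  | cons t ts ih =>
      simp only [List.foldl_cons, ih, List.mem_cons]
      constructor
      · rintro (h | h)
        · rcases le_max_iff.mp h with h | h
          · exact Or.inl h
          · exact Or.inr ⟨t, Or.inl rfl, h⟩
        · obtain ⟨u, hu, hg⟩ := h
          exact Or.inr ⟨u, Or.inr hu, hg⟩
      · rintro (h | ⟨u, (rfl | hu), hg⟩)
        · exact Or.inl (le_trans h (le_max_left _ _))
        · exact Or.inl (le_trans hg (le_max_right _ _))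
        · exact Or.inr ⟨u, hu, hg⟩

-- A's accumulator loop, characterised by a failed-filter of the combos
theorem loop_eq (tickets : List (List Int)) (g : Int) (p : List Int → Bool)
    (combos : List (List Int))
    (hpred : ∀ w ∈ combos, p w = true ↔
      ¬ (g ≤ tickets.foldl
          (fun m ticket =>
            max m ((PySem.Set.len (PySem.Set.inter (PySem.Set.ofList ticket) (PySem.Set.ofList w)) : Int)))
          0))
    (ver : Bool) (fl : List (List Int)) (tot cov : Int) :
    combos.foldl
      (fun (st : Bool × List (List Int) × Int × Int) winning =>
        let winning_set := PySem.Set.ofList winning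
        let max_hits : Int := tickets.foldl
          (fun m ticket =>
            max m ((PySem.Set.len (PySem.Set.inter (PySem.Set.ofList ticket) winning_set) : Int)))
          0
        let st' := (st.1, st.2.1, st.2.2.1 + 1, st.2.2.2)
        if max_hits ≥ g then
          (st'.1, st'.2.1, st'.2.2.1, st'.2.2.2 + 1)
        else
          (false, st'.2.1 ++ [winning], st'.2.2.1, st'.2.2.2))
      (ver, fl, tot, cov) =
    (ver && (combos.filter p).isEmpty,
     fl ++ combos.filter p,
     tot + combos.length,
     cov + ((combos.length : Int) - (combos.filter p).length)) := by
  induction combos generalizing ver fl tot cov with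
  | nil => simp
  | cons w ws ih =>
      have htail : ∀ w' ∈ ws, p w' = true ↔ _ := fun w' hw' => hpred w' (List.mem_cons_of_mem w hw')
      by_cases h : g ≤ tickets.foldl
          (fun m ticket =>
            max m ((PySem.Set.len (PySem.Set.inter (PySem.Set.ofList ticket) (PySem.Set.ofList w)) : Int)))
          0
      · have hpw : p w = false :=
          Bool.eq_false_iff.mpr (fun ht => ((hpred w (List.mem_cons_self)).mp ht) h)
        simp only [List.foldl_cons, ge_iff_le, if_pos h, List.filter_cons, hpw,
          Bool.false_eq_true, if_false, List.length_cons]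
        rw [ih htail]
        refine Prod.ext rfl (Prod.ext rfl (Prod.ext ?_ ?_)) <;> push_cast <;> ring
      · have hpw : p w = true := (hpred w List.mem_cons_self).mpr h
        simp only [List.foldl_cons, ge_iff_le, if_neg h, List.filter_cons, hpw, if_true,
          List.length_cons, List.isEmpty_cons, Bool.and_false]
        rw [ih htail]
        refine Prod.ext (by simp) (Prod.ext (by simp) (Prod.ext ?_ ?_)) <;>
          simp <;> push_cast <;> ring

-- B's failed-test (subset lookup) is the negation of A's covered-test, on sorted pool combos
theorem pred_eq_iff (tickets : List (List Int)) (numbers : List Int) (g : Int) (hg : 0 < g)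
    (w : List Int) (hw : w.Pairwise (· ≤ ·)) (hwn : ∀ a ∈ w, a ∈ numbers) :
    ((!((pyCombinations w g.toNat).any (fun s => PySem.Set.contains
        (tickets.foldl
          (fun s t => PySem.Set.update s
            (pyCombinations (PySem.List.sorted
              (PySem.Set.inter (PySem.Set.ofList t) (PySem.Set.ofList numbers)) (fun x => x)) g.toNat))
          PySem.Set.empty) s))) = true) ↔
      ¬ (g ≤ tickets.foldl
          (fun m ticket =>
            max m ((PySem.Set.len (PySem.Set.inter (PySem.Set.ofList ticket) (PySem.Set.ofList w)) : Int)))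
          0) := by
  have hpos : (((pyCombinations w g.toNat).any (fun s => PySem.Set.contains
      (tickets.foldl
        (fun s t => PySem.Set.update s
          (pyCombinations (PySem.List.sorted
            (PySem.Set.inter (PySem.Set.ofList t) (PySem.Set.ofList numbers)) (fun x => x)) g.toNat))
        PySem.Set.empty) s)) = true) ↔
      (g ≤ (0 : Int) ∨ ∃ t ∈ tickets, g ≤ ((PySem.Set.len (PySem.Set.inter (PySem.Set.ofList t) (PySem.Set.ofList w)) : Int))) := by
    simp only [List.any_eq_true, PySem.Set.contains_iff, mem_foldl_update]
    constructor
    · rintro ⟨s, hsw, hempty | ⟨t, ht, hsD⟩⟩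
      · exact absurd hempty (by simp [PySem.Set.empty])
      · refine Or.inr ⟨t, ht, ?_⟩
        have := (per_ticket_iff t numbers w g.toNat hw hwn).mp ⟨s, hsw, hsD⟩
        simp only [PySem.Set.len]
        omega
    · rintro (h0 | ⟨t, ht, hle⟩)
      · omega
      · have hle' : g.toNat ≤ (PySem.Set.inter (PySem.Set.ofList t) (PySem.Set.ofList w)).length := by
          simp only [PySem.Set.len] at hle; omega
        obtain ⟨s, hsw, hsD⟩ := (per_ticket_iff t numbers w g.toNat hw hwn).mpr hle'
        exact ⟨s, hsw, Or.inr ⟨t, ht, hsD⟩⟩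
  rw [maxscan_ge_iff tickets g
      (fun t => ((PySem.Set.len (PySem.Set.inter (PySem.Set.ofList t) (PySem.Set.ofList w)) : Int))) 0,
    ← hpos]
  simp

-- every member of the combos list is sorted and drawn from the pool
theorem combos_sorted (numbers : List Int) (r : Nat) (w : List Int)
    (hw : w ∈ pyCombinations (PySem.List.sorted numbers (fun x => x)) r) :
    w.Pairwise (· ≤ ·) ∧ ∀ a ∈ w, a ∈ numbers := by
  rw [mem_pyCombinations] at hw
  refine ⟨(PySem.List.sorted_pairwise numbers (fun x => x)).sublist hw.1, ?_⟩
  intro a ha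
  have := hw.1.subset ha
  rwa [PySem.List.mem_sorted] at this

-- ===== VERDICT (by name: the statement is the Claim_ definition above) =====
theorem verify_guarantee_spec : Claim_equal_verify_guarantee := by
  intro tickets numbers wc g _ _
  unfold Spec_verify_guarantee verify_guarantee verify_guarantee_alt
  by_cases hg : g ≤ 0
  · rw [loop_eq tickets g (fun _ => false) _
      (fun w _ => by
        simp only [Bool.false_eq_true, false_iff, not_not]
        exact (maxscan_ge_iff tickets g _ 0).mpr (Or.inl hg))]
    simp [hg]
  · by_cases hc : pyCombinations (PySem.List.sorted numbers (fun x => x)) wc.toNat = []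
    · simp [hc]
    · have hg' : (0 : Int) < g := by omega
      rw [if_neg (by simp [hg, hc])]
      by_cases hwg : wc < g
      · rw [if_pos hwg,
          loop_eq tickets g (fun _ => true) _
          (fun w hw => by
            simp only [true_iff]
            rw [maxscan_ge_iff]
            rintro (h0 | ⟨t, ht, hle⟩)
            · omega
            · have hwlen : w.length = wc.toNat := ((mem_pyCombinations w _ _).mp hw).2
              have hsub : PySem.Set.inter (PySem.Set.ofList t) (PySem.Set.ofList w) ⊆ w := by
                intro a ha
                simp only [pysem] at ha
                exact ha.2
              have hnd := PySem.Set.nodup_inter (PySem.Set.ofList t) (PySem.Set.ofList w)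
                (PySem.Set.nodup_ofList t)
              have hlen := (hnd.subperm hsub).length_le
              simp only [PySem.Set.len] at hle
              omega)]
        simp [List.filter_true, hc]
      · rw [if_neg hwg,
          loop_eq tickets g _ _
          (fun w hw => pred_eq_iff tickets numbers g hg' w
            (combos_sorted numbers _ w hw).1 (combos_sorted numbers _ w hw).2)]
        simp
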